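-- pv_equiv track=rewrite | github.com/yooji0415/Coding_Test | Programmers/Lv2/Lv2_더_맵게.py | solution
-- ===== SOURCE A (Python) =====
-- import heapq
--
-- def solution(scoville, K):
--     heapq.heapify(scoville)
--     cnt = 0
--
--     while scoville[0] < K:
--         if len(scoville) > 1:
--             f = heapq.heappop(scoville)
--             s = heapq.heappop(scoville)
--             n = f + s * 2
--             heapq.heappush(scoville, n)
--             cnt += 1
--         else:
--             return -1
--
--     return cnt
-- ===== SOURCE B (Python) =====
-- def _insort(lst, x):
--     # insert x into sorted lst, after any equal elements (bisect_right position)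
--     i = 0
--     while i < len(lst) and lst[i] <= x:
--         i += 1
--     lst.insert(i, x)
--
--
-- def solution(scoville, K):
--     # sorted-list strategy: sort once, pop the two smallest from the front,
--     # reinsert the mix by ordered insertion.  (Mutates scoville like A does,
--     # but leaves it sorted rather than heap-ordered.)
--     scoville.sort()
--     cnt = 0
--     while scoville[0] < K:
--         if len(scoville) > 1:
--             f = scoville.pop(0)
--             s = scoville.pop(0)
--             _insort(scoville, f + s * 2)
--             cnt += 1
--         else:
--             return -1
--     return cnt
-- ===== Notes on version B (the rewrite author's own statement) =====
-- stated objective: alternative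
-- what changed: Replaces the binary heap with a sorted list: sort once, take the two smallest at the front, and reinsert each mix by ordered insertion; same count logic and -1 behaviour. Equivalence is about the return value only: both mutate scoville in place but leave it in a different order (heap order vs sorted).
-- outside the precondition, e.g. on solution([], 5): A raises IndexError, B raises IndexError
import Mathlib
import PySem

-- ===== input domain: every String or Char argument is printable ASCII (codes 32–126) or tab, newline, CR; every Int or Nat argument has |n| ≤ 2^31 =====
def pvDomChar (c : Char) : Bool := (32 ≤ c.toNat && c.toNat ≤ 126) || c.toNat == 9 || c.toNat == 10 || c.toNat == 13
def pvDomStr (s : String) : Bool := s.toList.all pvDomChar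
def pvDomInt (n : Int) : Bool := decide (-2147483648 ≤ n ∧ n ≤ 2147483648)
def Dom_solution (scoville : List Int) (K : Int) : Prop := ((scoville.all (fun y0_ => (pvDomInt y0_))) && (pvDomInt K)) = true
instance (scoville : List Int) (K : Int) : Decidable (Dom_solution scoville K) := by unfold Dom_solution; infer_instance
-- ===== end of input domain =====

-- B replaces A's binary heap by a sorted list (sort once, pop the two smallest at the
-- front, reinsert the mix by ordered insertion); return values agree everywhere A returns.
-- Both Pythons mutate scoville in place but leave it in different orders (heap vs sorted);
-- the equivalence proved here is about the RETURN value only.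

-- ===== PORT A =====
-- heapq model: on Int values heapq's observable behaviour is exactly that of a
-- min-priority queue, so the heap is modelled by its list of elements (multiset view):
-- heapify = identity, heappop = remove the minimum value, heappush = append.
def heapMin : List Int → Int
  | [] => 0      -- never queried: A indexes scoville[0] first, so [] is outside Pre_
  | x :: xs => xs.foldl min x

-- needed by the port's termination argument (the heap minimum is an element of the heap)
theorem foldl_min_mem (xs : List Int) (x : Int) : xs.foldl min x = x ∨ xs.foldl min x ∈ xs := by
  induction xs generalizing x with
  | nil => exact Or.inl rfl
  | cons y ys ih =>
    have hfold : List.foldl min x (y :: ys) = List.foldl min (min x y) ys := rfl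
    rcases ih (min x y) with h | h
    · rcases le_total x y with hxy | hxy
      · rw [hfold, h, min_eq_left hxy]; exact Or.inl rfl
      · rw [hfold, h, min_eq_right hxy]; exact Or.inr (by simp)
    · rw [hfold]; exact Or.inr (List.mem_cons_of_mem _ h)

theorem heapMin_mem (h : List Int) (hne : h ≠ []) : heapMin h ∈ h := by
  cases h with
  | nil => exact absurd rfl hne
  | cons x xs =>
    rcases foldl_min_mem xs x with he | he
    · simp [heapMin, he]
    · simp [heapMin, he]

-- the while loop of A; recursion is on the heap size (each mix shrinks it by one)
def solutionLoopA (h : List Int) (K : Int) (cnt : Int) : Int :=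
  if h.length = 0 then -1    -- unreachable: scoville[0] raises on an empty heap (outside Pre_)
  else if heapMin h < K then
    if 1 < h.length then
      -- f = heappop(scoville); s = heappop(scoville); heappush(scoville, f + s*2); cnt += 1
      solutionLoopA ((h.erase (heapMin h)).erase (heapMin (h.erase (heapMin h)))
        ++ [heapMin h + heapMin (h.erase (heapMin h)) * 2]) K (cnt + 1)
    else -1
  else cnt
termination_by h.length
decreasing_by
  have hf : heapMin h ∈ h := heapMin_mem h (by intro hh; subst hh; simp at *)
  have h1len : (h.erase (heapMin h)).length = h.length - 1 := List.length_erase_of_mem hf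
  have hs : heapMin (h.erase (heapMin h)) ∈ h.erase (heapMin h) := by
    apply heapMin_mem
    intro hh
    rw [hh] at h1len
    simp at h1len
    omega
  have h2len := List.length_erase_of_mem hs
  simp only [List.length_append, List.length_cons, List.length_nil, h2len, h1len]
  omega

def solution (scoville : List Int) (K : Int) : Int :=
  solutionLoopA scoville K 0

-- ===== PORT B =====
-- _insort: insert x into a sorted list after any equal elements (Source B's linear insort)
def insortB (l : List Int) (x : Int) : List Int :=
  match l with
  | [] => [x]
  | y :: ys => if x < y then x :: y :: ys else y :: insortB ys x

theorem insortB_length (l : List Int) (x : Int) : (insortB l x).length = l.length + 1 := by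
  induction l with
  | nil => rfl
  | cons y ys ih =>
    by_cases hxy : x < y
    · simp [insortB, hxy]
    · simp [insortB, hxy, ih]

-- the while loop of B over the sorted list
def solutionAltLoop (s : List Int) (K : Int) (cnt : Int) : Int :=
  match s with
  | [] => -1          -- unreachable: scoville[0] raises on [] (outside Pre_)
  | x :: rest =>
    if x < K then
      match rest with
      | [] => -1
      | y :: rest2 => solutionAltLoop (insortB rest2 (x + y * 2)) K (cnt + 1)
    else cnt
termination_by s.length
decreasing_by simp [insortB_length]

def solution_alt (scoville : List Int) (K : Int) : Int :=
  solutionAltLoop (PySem.List.sorted scoville (fun x => x) false) K 0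

-- ===== PRECONDITION & SPEC =====
-- Pre_ excludes only the empty list, on which both A and B raise IndexError at scoville[0].
def Pre_solution (scoville : List Int) (K : Int) : Prop := scoville ≠ []
instance (scoville : List Int) (K : Int) : Decidable (Pre_solution scoville K) := by unfold Pre_solution; infer_instance
def pvWitness_solution : List Int × Int := ([2, 3, 1], 7)

def Spec_solution (scoville : List Int) (K : Int) (out : Int) : Prop := out = solution_alt scoville K
instance (scoville : List Int) (K : Int) (out : Int) : Decidable (Spec_solution scoville K out) := by unfold Spec_solution; infer_instance

-- ===== CLAIM (what is proved, stated in full; the proofs are below) =====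
def Claim_equal_solution : Prop := ∀ (scoville : List Int) (K : Int), Dom_solution scoville K → Pre_solution scoville K → Spec_solution scoville K (solution scoville K)

-- ===== LEMMAS AND PROOFS =====

theorem foldl_min_le (xs : List Int) (x : Int) :
    xs.foldl min x ≤ x ∧ ∀ a ∈ xs, xs.foldl min x ≤ a := by
  induction xs generalizing x with
  | nil => exact ⟨le_refl x, by simp⟩
  | cons y ys ih =>
    obtain ⟨h1, h2⟩ := ih (min x y)
    refine ⟨le_trans h1 (min_le_left _ _), ?_⟩
    intro a ha
    rcases List.mem_cons.mp ha with rfl | ha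
    · exact le_trans h1 (min_le_right _ _)
    · exact h2 a ha

theorem heapMin_le (h : List Int) (a : Int) (ha : a ∈ h) : heapMin h ≤ a := by
  cases h with
  | nil => simp at ha
  | cons x xs =>
    rcases List.mem_cons.mp ha with rfl | ha
    · exact (foldl_min_le xs a).1
    · exact (foldl_min_le xs x).2 a ha

-- a list permuting a sorted x :: rest has minimum x
theorem heapMin_eq_head (hA : List Int) (x : Int) (rest : List Int)
    (hp : hA.Perm (x :: rest)) (hs : (x :: rest).Pairwise (· ≤ ·)) : heapMin hA = x := by
  have hxA : x ∈ hA := hp.symm.subset (by simp)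
  have h1 : heapMin hA ≤ x := heapMin_le hA x hxA
  have hmem : heapMin hA ∈ x :: rest := hp.subset (heapMin_mem hA (by
    intro hh; rw [hh] at hp; exact List.cons_ne_nil x rest hp.symm.eq_nil))
  have h2 : x ≤ heapMin hA := by
    rcases List.mem_cons.mp hmem with he | hm
    · omega
    · exact (List.pairwise_cons.mp hs).1 _ hm
  omega

theorem insortB_perm (l : List Int) (x : Int) : (insortB l x).Perm (x :: l) := by
  induction l with
  | nil => exact List.Perm.refl _
  | cons y ys ih =>
    by_cases hxy : x < y
    · simp [insortB, hxy]
    · simpa [insortB, hxy] using ((ih.cons y).trans (List.Perm.swap x y ys))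

theorem insortB_pairwise (l : List Int) (x : Int) (hs : l.Pairwise (· ≤ ·)) :
    (insortB l x).Pairwise (· ≤ ·) := by
  induction l with
  | nil => exact List.pairwise_singleton _ _
  | cons y ys ih =>
    obtain ⟨hy, hys⟩ := List.pairwise_cons.mp hs
    by_cases hxy : x < y
    · rw [insortB, if_pos hxy]
      refine List.pairwise_cons.mpr ⟨?_, hs⟩
      intro a ha
      rcases List.mem_cons.mp ha with rfl | ha
      · omega
      · have := hy a ha; omega
    · rw [insortB, if_neg hxy]
      refine List.pairwise_cons.mpr ⟨?_, ih hys⟩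
      intro a ha
      have : a ∈ x :: ys := (insortB_perm ys x).subset ha
      rcases List.mem_cons.mp this with rfl | ha2
      · omega
      · exact hy a ha2

-- main invariant: A's heap and B's sorted list hold the same multiset, so both loops agree
theorem loop_eq (n : Nat) : ∀ (hA hB : List Int) (K cnt : Int), hA.length = n →
    hA.Perm hB → hB.Pairwise (· ≤ ·) →
    solutionLoopA hA K cnt = solutionAltLoop hB K cnt := by
  induction n with
  | zero =>
    intro hA hB K cnt hlen hp _
    have hAnil : hA = [] := List.length_eq_zero_iff.mp hlen
    subst hAnil
    have hBnil : hB = [] := hp.symm.eq_nil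
    subst hBnil
    rw [solutionLoopA, solutionAltLoop]
    simp
  | succ n ih =>
    intro hA hB K cnt hlen hp hs
    cases hB with
    | nil =>
      exact absurd (hp.eq_nil) (by intro hh; rw [hh] at hlen; simp at hlen)
    | cons x rest =>
      have hmin : heapMin hA = x := heapMin_eq_head hA x rest hp hs
      have hlenB : hA.length = rest.length + 1 := by simpa using hp.length_eq
      rw [solutionLoopA, if_neg (show ¬hA.length = 0 by omega), hmin]
      by_cases hK : x < K
      · rw [if_pos hK]
        cases rest with
        | nil =>
          rw [if_neg (by simp at hlenB; omega)]
          rw [solutionAltLoop, if_pos hK]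
        | cons y rest2 =>
          rw [if_pos (by simp at hlenB; omega)]
          -- first pop: hA.erase x ~ rest
          have hp1 : (hA.erase x).Perm (y :: rest2) := by
            have := hp.erase x
            rwa [List.erase_cons_head] at this
          have hs1 : (y :: rest2).Pairwise (· ≤ ·) := (List.pairwise_cons.mp hs).2
          have hmin1 : heapMin (hA.erase x) = y := heapMin_eq_head _ y rest2 hp1 hs1
          rw [hmin1]
          -- second pop: (hA.erase x).erase y ~ rest2
          have hp2 : ((hA.erase x).erase y).Perm rest2 := by
            have := hp1.erase y
            rwa [List.erase_cons_head] at this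
          -- pushed heap ~ insorted list
          have hp3 : (((hA.erase x).erase y) ++ [x + y * 2]).Perm (insortB rest2 (x + y * 2)) := by
            refine List.Perm.trans ?_ (insortB_perm rest2 (x + y * 2)).symm
            exact (hp2.append (List.Perm.refl _)).trans List.perm_append_comm
          have hlen3 : (((hA.erase x).erase y) ++ [x + y * 2]).length = n := by
            have h1 := hp3.length_eq
            rw [insortB_length] at h1
            have h2 := hp2.length_eq
            simp at hlenB
            omega
          rw [ih _ _ K (cnt + 1) hlen3 hp3
              (insortB_pairwise rest2 (x + y * 2) (List.pairwise_cons.mp hs1).2)]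
          conv_rhs => rw [solutionAltLoop]
          rw [if_pos hK]
      · rw [if_neg hK]
        rw [solutionAltLoop.eq_def]
        simp [hK]

-- ===== VERDICT (by name: the statement is the Claim_ definition above) =====
theorem solution_spec : Claim_equal_solution := by
  intro scoville K _ _
  unfold Spec_solution solution solution_alt
  exact loop_eq scoville.length scoville _ K 0 rfl
    (PySem.List.sorted_perm scoville (fun x => x) false).symm
    (by simpa using PySem.List.sorted_pairwise scoville (fun x => x))
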